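-- pv_equiv track=rewrite | github.com/TimurDenisenko/Isikukood | OmaModule.py | arg
-- ===== SOURCE A (Python) =====
-- def arg(x:list)->list:
--     naised=[]
--     mehed=[]
--     for kood in x:
--         kood_=list(kood)
--         if int(kood_[0])%2==0:
--             naised.append(kood)
--         else:
--             mehed.append(kood)
--     naised.extend(mehed)
--     x=naised
--     return x
-- ===== SOURCE B (Python) =====
-- def arg(x: list) -> list:
--     # stable sort on first-digit parity: even (key 0) codes keep order and precede odd (key 1)
--     return sorted(x, key=lambda k: int(k[0]) % 2)
-- ===== Notes on version B (the rewrite author's own statement) =====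
-- stated objective: idiomatic
-- what changed: Replaces the two-bucket append loop with a single stable sort keyed on first-digit parity (even key 0 first), relying on sort stability to reproduce the even-then-odd concatenation.
import Mathlib
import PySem

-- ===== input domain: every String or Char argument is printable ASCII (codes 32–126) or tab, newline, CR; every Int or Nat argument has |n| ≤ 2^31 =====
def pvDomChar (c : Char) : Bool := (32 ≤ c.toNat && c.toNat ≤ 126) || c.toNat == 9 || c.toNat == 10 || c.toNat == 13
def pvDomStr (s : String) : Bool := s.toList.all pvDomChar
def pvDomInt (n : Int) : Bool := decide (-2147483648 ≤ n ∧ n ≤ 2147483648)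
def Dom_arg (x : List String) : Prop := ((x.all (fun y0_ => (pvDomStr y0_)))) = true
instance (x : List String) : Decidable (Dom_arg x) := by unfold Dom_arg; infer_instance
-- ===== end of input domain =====

-- B replaces A's two-bucket append loop with one stable sort keyed on first-digit parity; return value only, A does not mutate x.


-- ===== PORT A =====
-- int(list(kood)[0]) % 2 : first char indexed, parsed, taken mod 2 (default outside Pre_ is irrelevant: Python raises there)
def arg (x : List String) : List String :=
  let r := x.foldl
    (fun (acc : List String × List String) kood =>
      let kood_ := kood.toList
      let d := ((PySem.List.pyGet? kood_ 0).bind (fun c => PySem.Int.ofChars? [c])).getD 1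
      if PySem.Int.mod d 2 == 0 then (acc.1 ++ [kood], acc.2) else (acc.1, acc.2 ++ [kood]))
    ([], [])
  r.1 ++ r.2

-- ===== PORT B =====
def arg_alt (x : List String) : List String :=
  PySem.List.sorted x
    (fun k => PySem.Int.mod (((PySem.List.pyGet? k.toList 0).bind (fun c => PySem.Int.ofChars? [c])).getD 1) 2)
    false

-- ===== PRECONDITION & SPEC =====
-- Pre_ excludes inputs where Python A raises: an empty code (IndexError) or a first character that is not an ASCII digit (ValueError in int()).
def Pre_arg (x : List String) : Prop := ∀ s ∈ x, s.toList ≠ [] ∧ (s.toList.headD ' ').isDigit = true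
instance (x : List String) : Decidable (Pre_arg x) := by unfold Pre_arg; infer_instance
def pvWitness_arg : List String := (["123", "456", "7"])
def Spec_arg (x : List String) (out : List String) : Prop := out = arg_alt x
instance (x : List String) (out : List String) : Decidable (Spec_arg x out) := by unfold Spec_arg; infer_instance

-- ===== CLAIM (what is proved, stated in full; the proofs are below) =====
def Claim_equal_arg : Prop := ∀ (x : List String), Dom_arg x → Pre_arg x → Spec_arg x (arg x)

-- ===== LEMMAS AND PROOFS =====

-- the shared parity key
def pvKey (k : String) : Int :=
  PySem.Int.mod (((PySem.List.pyGet? k.toList 0).bind (fun c => PySem.Int.ofChars? [c])).getD 1) 2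

lemma pvKey_binary (s : String) : pvKey s = 0 ∨ pvKey s = 1 := by
  have h1 : 0 ≤ PySem.Int.mod (((PySem.List.pyGet? s.toList 0).bind (fun c => PySem.Int.ofChars? [c])).getD 1) 2 :=
    PySem.Int.mod_nonneg _ (by omega)
  have h2 : PySem.Int.mod (((PySem.List.pyGet? s.toList 0).bind (fun c => PySem.Int.ofChars? [c])).getD 1) 2 < 2 :=
    PySem.Int.mod_lt _ (by omega)
  unfold pvKey; omega

-- inserting an even-key element into evens ++ odds lands between the groups
lemma insertBy_mid (x : String) (E O : List String)
    (hx : pvKey x = 0) (hE : ∀ e ∈ E, pvKey e = 0) (hO : ∀ o ∈ O, pvKey o = 1) :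
    PySem.List.insertBy (fun a b => decide (pvKey a < pvKey b)) x (E ++ O) = E ++ x :: O := by
  induction E with
  | nil =>
    cases O with
    | nil => rfl
    | cons o os =>
      have ho : pvKey o = 1 := hO o (by simp)
      simp [PySem.List.insertBy, hx, ho]
  | cons e es ih =>
    have he : pvKey e = 0 := hE e (by simp)
    have hb : decide (pvKey x < pvKey e) = false := by simp [hx, he]
    simp only [List.cons_append, PySem.List.insertBy, hb, Bool.false_eq_true, if_false]
    rw [ih (fun a ha => hE a (by simp [ha]))]

-- inserting an odd-key element appends at the end
lemma insertBy_end (x : String) (L : List String)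
    (hx : pvKey x = 1) (hL : ∀ a ∈ L, pvKey a = 0 ∨ pvKey a = 1) :
    PySem.List.insertBy (fun a b => decide (pvKey a < pvKey b)) x L = L ++ [x] := by
  apply PySem.List.insertBy_of_forall_not_before
  intro y hy
  rcases hL y hy with h | h <;> simp [hx, h]

-- the insertion-sort fold keeps the evens-then-odds shape
lemma foldl_insertBy_shape (xs E O : List String)
    (hE : ∀ e ∈ E, pvKey e = 0) (hO : ∀ o ∈ O, pvKey o = 1) :
    xs.foldl (fun acc x => PySem.List.insertBy (fun a b => decide (pvKey a < pvKey b)) x acc) (E ++ O)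
      = (E ++ xs.filter (fun s => pvKey s == 0)) ++ (O ++ xs.filter (fun s => pvKey s == 1)) := by
  induction xs generalizing E O with
  | nil => simp
  | cons x xs ih =>
    rcases pvKey_binary x with hx | hx
    · have hE' : ∀ e ∈ E ++ [x], pvKey e = 0 := by
        intro e he
        rcases List.mem_append.mp he with h | h
        · exact hE e h
        · simp at h; subst h; exact hx
      simp only [List.foldl_cons, List.filter_cons, hx]
      rw [insertBy_mid x E O hx hE hO,
          show E ++ x :: O = (E ++ [x]) ++ O by simp,
          ih (E ++ [x]) O hE' hO]
      simp
    · have hO' : ∀ o ∈ O ++ [x], pvKey o = 1 := by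
        intro o ho
        rcases List.mem_append.mp ho with h | h
        · exact hO o h
        · simp at h; subst h; exact hx
      have hL : ∀ a ∈ E ++ O, pvKey a = 0 ∨ pvKey a = 1 := by
        intro a ha; rcases List.mem_append.mp ha with h | h
        · exact Or.inl (hE a h)
        · exact Or.inr (hO a h)
      simp only [List.foldl_cons, List.filter_cons, hx]
      rw [insertBy_end x (E ++ O) hx hL,
          show (E ++ O) ++ [x] = E ++ (O ++ [x]) by simp,
          ih E (O ++ [x]) hE hO']
      simp

-- B's sort is the two-filter concatenation
lemma arg_alt_eq_filters (x : List String) :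
    arg_alt x = x.filter (fun s => pvKey s == 0) ++ x.filter (fun s => pvKey s == 1) := by
  show PySem.List.sorted x pvKey false = _
  rw [PySem.List.sorted_eq_foldl_insertBy]
  have := foldl_insertBy_shape x [] [] (by simp) (by simp)
  simpa using this

-- A's two-bucket fold computes the two filters
lemma arg_foldl_shape (x : List String) (n m : List String) :
    x.foldl
      (fun (acc : List String × List String) kood =>
        let kood_ := kood.toList
        let d := ((PySem.List.pyGet? kood_ 0).bind (fun c => PySem.Int.ofChars? [c])).getD 1
        if PySem.Int.mod d 2 == 0 then (acc.1 ++ [kood], acc.2) else (acc.1, acc.2 ++ [kood]))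
      (n, m)
      = (n ++ x.filter (fun s => pvKey s == 0), m ++ x.filter (fun s => pvKey s == 1)) := by
  induction x generalizing n m with
  | nil => simp
  | cons s xs ih =>
    have hkey : pvKey s = PySem.Int.mod (((PySem.List.pyGet? s.toList 0).bind (fun c => PySem.Int.ofChars? [c])).getD 1) 2 := rfl
    simp only [List.foldl_cons, List.filter_cons]
    rcases pvKey_binary s with hs | hs
    · have hc : (PySem.Int.mod (((PySem.List.pyGet? s.toList 0).bind (fun c => PySem.Int.ofChars? [c])).getD 1) 2 == 0) = true := by
        rw [← hkey, hs]; rfl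
      simp only [hc, hs, if_true]
      rw [ih]; simp
    · have hc : (PySem.Int.mod (((PySem.List.pyGet? s.toList 0).bind (fun c => PySem.Int.ofChars? [c])).getD 1) 2 == 0) = false := by
        rw [← hkey, hs]; rfl
      simp only [hc, hs, Bool.false_eq_true, if_false]
      rw [ih]; simp

-- ===== VERDICT (by name: the statement is the Claim_ definition above) =====
theorem arg_spec : Claim_equal_arg := by
  intro x _ _
  show arg x = arg_alt x
  rw [arg_alt_eq_filters]
  unfold arg
  rw [arg_foldl_shape x [] []]
  simp
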